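-- pv_equiv track=rewrite | github.com/dcomrad/url-shortener | yacut/utils.py | check_short_id
-- ===== SOURCE A (Python) =====
-- ALLOWED_SYMBOLS = [(48, 58), (65, 91), (97, 123)]  # 0-9, A-Z, a-z
--
-- def check_short_id(short_id: str) -> bool:
--     if len(short_id) > 16:
--         return False
--
--     for char in short_id:
--         is_ok = False
--
--         for start, end in ALLOWED_SYMBOLS:
--             if start <= ord(char) < end:
--                 is_ok = True
--
--         if not is_ok:
--             return False
--
--     return True
-- ===== SOURCE B (Python) =====
-- import re
--
-- _SHORT_ID_RE = re.compile(r'[0-9A-Za-z]{0,16}')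
--
-- def check_short_id(short_id: str) -> bool:
--     return _SHORT_ID_RE.fullmatch(short_id) is not None
-- ===== Notes on version B (the rewrite author's own statement) =====
-- stated objective: idiomatic
-- what changed: Replaced the length guard plus nested ord-range loops with a single precompiled regex fullmatch against [0-9A-Za-z]{0,16}.
import Mathlib
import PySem

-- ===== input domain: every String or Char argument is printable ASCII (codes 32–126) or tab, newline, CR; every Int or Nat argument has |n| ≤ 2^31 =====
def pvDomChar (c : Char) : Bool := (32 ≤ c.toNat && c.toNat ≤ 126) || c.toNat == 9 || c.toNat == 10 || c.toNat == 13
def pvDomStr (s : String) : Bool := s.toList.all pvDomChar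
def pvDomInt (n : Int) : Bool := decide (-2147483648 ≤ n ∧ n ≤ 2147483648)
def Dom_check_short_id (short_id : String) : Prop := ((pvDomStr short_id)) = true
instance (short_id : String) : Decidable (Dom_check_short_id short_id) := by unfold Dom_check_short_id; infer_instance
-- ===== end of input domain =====

-- B replaces A's length guard and nested ord-range loops with a single regex fullmatch
-- against [0-9A-Za-z]{0,16} (idiomatic; same return value).

-- ===== PORT A =====
def ALLOWED_SYMBOLS : List (Int × Int) := [(48, 58), (65, 91), (97, 123)]

-- inner 'for start, end in ALLOWED_SYMBOLS' loop updating is_ok (initially False)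
def pvInnerA (c : Char) : Bool :=
  ALLOWED_SYMBOLS.foldl
    (fun is_ok se => if se.1 ≤ (c.toNat : Int) ∧ (c.toNat : Int) < se.2 then true else is_ok)
    false

-- outer 'for char in short_id' loop with the early 'return False'
def pvLoopA : List Char → Bool
  | [] => true
  | c :: rest => if pvInnerA c then pvLoopA rest else false

def check_short_id (short_id : String) : Bool :=
  if short_id.toList.length > 16 then false
  else pvLoopA short_id.toList

-- ===== PORT B =====
-- re.fullmatch(r'[0-9A-Za-z]{0,16}', s): every char in the class, and length ≤ 16
def pvClassB (c : Char) : Bool :=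
  ('0' ≤ c && c ≤ '9') || ('A' ≤ c && c ≤ 'Z') || ('a' ≤ c && c ≤ 'z')

def check_short_id_alt (short_id : String) : Bool :=
  decide (short_id.toList.length ≤ 16) && short_id.toList.all pvClassB

-- ===== PRECONDITION & SPEC =====
def Spec_check_short_id (short_id : String) (out : Bool) : Prop := out = check_short_id_alt short_id
instance (short_id : String) (out : Bool) : Decidable (Spec_check_short_id short_id out) := by unfold Spec_check_short_id; infer_instance

-- ===== CLAIM (what is proved, stated in full; the proofs are below) =====
def Claim_equal_check_short_id : Prop := ∀ (short_id : String), Dom_check_short_id short_id → Spec_check_short_id short_id (check_short_id short_id)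

-- ===== LEMMAS AND PROOFS =====
theorem pvInnerA_eq_classB (c : Char) : pvInnerA c = pvClassB c := by
  rw [Bool.eq_iff_iff]
  simp only [pvInnerA, ALLOWED_SYMBOLS, List.foldl, pvClassB, Char.le_def,
    UInt32.le_iff_toNat_le, Char.toNat_val, Char.reduceVal, UInt32.reduceToNat,
    Bool.or_eq_true, Bool.and_eq_true, decide_eq_true_eq]
  split_ifs <;> simp_all <;> omega

theorem pvLoopA_eq_all (l : List Char) : pvLoopA l = l.all pvClassB := by
  induction l with
  | nil => rfl
  | cons c rest ih =>
      rw [pvLoopA, pvInnerA_eq_classB, List.all_cons, ih]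
      cases pvClassB c <;> simp

-- ===== VERDICT (by name: the statement is the Claim_ definition above) =====
theorem check_short_id_spec : Claim_equal_check_short_id := by
  intro s _
  unfold Spec_check_short_id check_short_id check_short_id_alt
  split_ifs with h
  · rw [decide_eq_false (by omega : ¬ s.toList.length ≤ 16), Bool.false_and]
  · rw [decide_eq_true (by omega : s.toList.length ≤ 16), Bool.true_and, pvLoopA_eq_all]
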